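-- pv_equiv track=rewrite | github.com/lruizap/UniScann | src/1.-BarcodeDetector/detector/validator.py | is_valid_upca
-- ===== SOURCE A (Python) =====
-- def is_valid_upca(code):
--     """
--     Verifica si un código es un UPC-A válido
--
--     Args:
--         code (str): Código a validar
--
--     Returns:
--         bool: True si es válido, False en caso contrario
--     """
--     if len(code) != 12:
--         return False
--
--     if not code.isdigit():
--         return False
--
--     # Algoritmo de validación UPC-A
--     odd_sum = sum(int(code[i]) for i in range(0, 11, 2))
--     even_sum = sum(int(code[i]) for i in range(1, 11, 2))
--     checksum = (10 - ((odd_sum * 3 + even_sum) % 10)) % 10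
--
--     return checksum == int(code[11])
-- ===== SOURCE B (Python) =====
-- def is_valid_upca(code):
--     """
--     Verifica si un codigo es un UPC-A valido
--
--     Args:
--         code (str): Codigo a validar
--
--     Returns:
--         bool: True si es valido, False en caso contrario
--     """
--     if len(code) != 12 or not code.isdigit():
--         return False
--
--     # Single weighted pass: digits at even index weigh 3, odd index weigh 1
--     # (including the check digit); valid iff the total is divisible by 10.
--     total = 0
--     for i, d in enumerate(code):
--         total += int(d) * (3 if i % 2 == 0 else 1)
--     return total % 10 == 0
-- ===== Notes on version B (the rewrite author's own statement) =====
-- stated objective: simpler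
-- what changed: Replaces the two strided comprehensions plus the explicit (10 - s%10)%10 check-digit formula with one weighted pass over all 12 digits, accepting iff the total weighted sum is divisible by 10.
import Mathlib
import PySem

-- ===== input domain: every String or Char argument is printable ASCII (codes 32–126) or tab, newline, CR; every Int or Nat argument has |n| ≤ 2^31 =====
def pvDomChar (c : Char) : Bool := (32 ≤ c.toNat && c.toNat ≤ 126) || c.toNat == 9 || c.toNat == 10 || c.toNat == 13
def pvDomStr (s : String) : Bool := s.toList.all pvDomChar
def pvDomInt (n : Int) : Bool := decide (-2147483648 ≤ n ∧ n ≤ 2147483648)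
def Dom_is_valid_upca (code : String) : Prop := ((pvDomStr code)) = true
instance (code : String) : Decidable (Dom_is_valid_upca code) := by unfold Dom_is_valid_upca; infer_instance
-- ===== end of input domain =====

-- B replaces A's two strided sums and explicit check-digit formula by one weighted
-- pass over all 12 digits testing divisibility by 10 (objective: simpler).

-- ===== PORT A =====
-- int(code[i]) on a single char; after the isdigit guard ofChars? is always `some`,
-- so the .getD 0 default is unreachable.
def is_valid_upca (code : String) : Bool :=
  let l := code.toList
  if l.length ≠ 12 then false
  else if ¬ (PySem.Chars.strIsdigit l = true) then false
  else
    let odd_sum := (PySem.List.pyRange 0 11 2).foldl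
      (fun acc i => acc + (PySem.Int.ofChars? [PySem.List.pyGetD l i ' ']).getD 0) 0
    let even_sum := (PySem.List.pyRange 1 11 2).foldl
      (fun acc i => acc + (PySem.Int.ofChars? [PySem.List.pyGetD l i ' ']).getD 0) 0
    let checksum := PySem.Int.mod (10 - PySem.Int.mod (odd_sum * 3 + even_sum) 10) 10
    checksum == (PySem.Int.ofChars? [PySem.List.pyGetD l 11 ' ']).getD 0

-- ===== PORT B =====
def is_valid_upca_alt (code : String) : Bool :=
  let l := code.toList
  if l.length ≠ 12 ∨ ¬ (PySem.Chars.strIsdigit l = true) then false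
  else
    let total := (PySem.List.enumerate l 0).foldl
      (fun acc p => acc + (PySem.Int.ofChars? [p.2]).getD 0 *
        (if PySem.Int.mod p.1 2 = 0 then 3 else 1)) 0
    PySem.Int.mod total 10 == 0

-- ===== PRECONDITION & SPEC =====
def Spec_is_valid_upca (code : String) (out : Bool) : Prop := out = is_valid_upca_alt code
instance (code : String) (out : Bool) : Decidable (Spec_is_valid_upca code out) := by unfold Spec_is_valid_upca; infer_instance

-- ===== CLAIM (what is proved, stated in full; the proofs are below) =====
def Claim_equal_is_valid_upca : Prop := ∀ (code : String), Dom_is_valid_upca code → Spec_is_valid_upca code (is_valid_upca code)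

-- ===== LEMMAS AND PROOFS =====

theorem digit_mem (c : Char) (h : PySem.Chars.isdigit c = true) :
    c ∈ ['0','1','2','3','4','5','6','7','8','9'] := by
  simp [PySem.Chars.isdigit, Char.le_def] at h
  obtain ⟨h1, h2⟩ := h
  have h3 : 48 ≤ c.toNat ∧ c.toNat ≤ 57 := by
    constructor <;> exact_mod_cast ‹_›
  have hv : c.toNat = 48 ∨ c.toNat = 49 ∨ c.toNat = 50 ∨ c.toNat = 51 ∨ c.toNat = 52 ∨
      c.toNat = 53 ∨ c.toNat = 54 ∨ c.toNat = 55 ∨ c.toNat = 56 ∨ c.toNat = 57 := by omega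
  rcases hv with h|h|h|h|h|h|h|h|h|h <;>
    · have hc : c = Char.ofNat c.toNat := by rw [Char.ofNat_toNat]
      rw [hc, h]; decide

theorem digit_bounds (c : Char) (h : PySem.Chars.isdigit c = true) :
    0 ≤ (PySem.Int.ofChars? [c]).getD 0 ∧ (PySem.Int.ofChars? [c]).getD 0 ≤ 9 := by
  have := digit_mem c h
  fin_cases this <;> decide


theorem upca_main (c0 c1 c2 c3 c4 c5 c6 c7 c8 c9 c10 c11 : Char)
    (hd : PySem.Chars.strIsdigit [c0,c1,c2,c3,c4,c5,c6,c7,c8,c9,c10,c11] = true) :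
    (let l := [c0,c1,c2,c3,c4,c5,c6,c7,c8,c9,c10,c11]
     let odd_sum := (PySem.List.pyRange 0 11 2).foldl
      (fun acc i => acc + (PySem.Int.ofChars? [PySem.List.pyGetD l i ' ']).getD 0) 0
     let even_sum := (PySem.List.pyRange 1 11 2).foldl
      (fun acc i => acc + (PySem.Int.ofChars? [PySem.List.pyGetD l i ' ']).getD 0) 0
     let checksum := PySem.Int.mod (10 - PySem.Int.mod (odd_sum * 3 + even_sum) 10) 10
     (checksum == (PySem.Int.ofChars? [PySem.List.pyGetD l 11 ' ']).getD 0 : Bool))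
    =
    (let l := [c0,c1,c2,c3,c4,c5,c6,c7,c8,c9,c10,c11]
     let total := (PySem.List.enumerate l 0).foldl
      (fun acc p => acc + (PySem.Int.ofChars? [p.2]).getD 0 *
        (if PySem.Int.mod p.1 2 = 0 then 3 else 1)) 0
     (PySem.Int.mod total 10 == 0 : Bool)) := by
  have h11 : PySem.Chars.isdigit c11 = true := by
    simp [PySem.Chars.strIsdigit] at hd; tauto
  obtain ⟨hb0, hb1⟩ := digit_bounds c11 h11
  dsimp only
  simp only [show PySem.List.pyRange 0 11 2 = [0,2,4,6,8,10] from by decide,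
    show PySem.List.pyRange 1 11 2 = [1,3,5,7,9] from by decide]
  simp only [PySem.List.enumerate, List.foldl]
  simp [PySem.List.pyGetD]
  generalize (PySem.Int.ofChars? [c0]).getD 0 = x0
  generalize (PySem.Int.ofChars? [c1]).getD 0 = x1
  generalize (PySem.Int.ofChars? [c2]).getD 0 = x2
  generalize (PySem.Int.ofChars? [c3]).getD 0 = x3
  generalize (PySem.Int.ofChars? [c4]).getD 0 = x4
  generalize (PySem.Int.ofChars? [c5]).getD 0 = x5
  generalize (PySem.Int.ofChars? [c6]).getD 0 = x6
  generalize (PySem.Int.ofChars? [c7]).getD 0 = x7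
  generalize (PySem.Int.ofChars? [c8]).getD 0 = x8
  generalize (PySem.Int.ofChars? [c9]).getD 0 = x9
  generalize (PySem.Int.ofChars? [c10]).getD 0 = x10
  generalize hg11 : (PySem.Int.ofChars? [c11]).getD 0 = x11
  rw [hg11] at hb0 hb1
  omega

-- ===== VERDICT (by name: the statement is the Claim_ definition above) =====
theorem is_valid_upca_spec : Claim_equal_is_valid_upca := by
  intro code _
  unfold Spec_is_valid_upca is_valid_upca is_valid_upca_alt
  generalize code.toList = l
  by_cases hlen : l.length = 12
  · by_cases hdig : PySem.Chars.strIsdigit l = true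
    · rw [if_neg (by simp [hlen]), if_neg (by simp [hdig]), if_neg (by simp [hlen, hdig])]
      rcases l with _|⟨c0,_|⟨c1,_|⟨c2,_|⟨c3,_|⟨c4,_|⟨c5,_|⟨c6,_|⟨c7,_|⟨c8,_|⟨c9,_|⟨c10,_|⟨c11,_|⟨c12,rest⟩⟩⟩⟩⟩⟩⟩⟩⟩⟩⟩⟩⟩ <;>
        first
          | exact upca_main c0 c1 c2 c3 c4 c5 c6 c7 c8 c9 c10 c11 hdig
          | (exfalso; simp at hlen)
    · simp [hdig]
  · simp [hlen]
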